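-- pv_equiv track=rewrite | github.com/Shubham-Choudhury/GeeksforGeeks-Problems | 2025/06 June/24 Lexicographically Largest String After Deleting K Characters/main.py | maxSubseq
-- ===== SOURCE A (Python) =====
-- def maxSubseq(s: str, k: int) -> str:
--     n = len(s)
--     res = ""
--     rem = n - k
--
--     for i in range(n):
--         while res and k > 0 and res[-1] < s[i]:
--             res = res[:-1]
--             k -= 1
--
--         res += s[i]
--
--     while k > 0:
--         res = res[:-1]
--         k -= 1
--
--     return res
-- ===== SOURCE B (Python) =====
-- def maxSubseq(s: str, k: int) -> str:
--     n = len(s)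
--     if k <= 0:
--         return s
--     if k >= n:
--         return ''
--     L = n - k
--     out = []
--     start = 0
--     for i in range(L):
--         end = n - (L - i)  # inclusive right edge of the window
--         best = start
--         for j in range(start + 1, end + 1):
--             if s[j] > s[best]:
--                 best = j
--         out.append(s[best])
--         start = best + 1
--     return ''.join(out)
-- ===== Notes on version B (the rewrite author's own statement) =====
-- stated objective: alternative
-- what changed: Replaces A's monotonic-stack single pass (greedy pops plus end trimming) by repeated leftmost-maximum selection over a sliding window with a start pointer, after clamping the degenerate cases k<=0 and k>=n.
import Mathlib
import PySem

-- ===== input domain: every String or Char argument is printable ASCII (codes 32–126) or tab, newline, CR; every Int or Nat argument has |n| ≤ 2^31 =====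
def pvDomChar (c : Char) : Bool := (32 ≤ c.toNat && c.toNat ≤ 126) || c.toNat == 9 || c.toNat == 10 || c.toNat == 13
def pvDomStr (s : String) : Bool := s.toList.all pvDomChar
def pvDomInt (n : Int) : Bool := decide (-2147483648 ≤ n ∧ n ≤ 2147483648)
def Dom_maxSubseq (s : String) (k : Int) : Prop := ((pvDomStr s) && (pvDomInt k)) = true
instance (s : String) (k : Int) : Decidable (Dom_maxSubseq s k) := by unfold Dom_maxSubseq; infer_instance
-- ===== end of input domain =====

-- B replaces A's monotonic-stack pass (with end-of-string trimming) by repeated leftmost-max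
-- selection over a sliding window; same return value, different algorithm ('alternative').

-- ===== PORT A =====
-- the inner `while res and k > 0 and res[-1] < s[i]` loop
def pvPopsA (res : List Char) (k : Int) (c : Char) : List Char × Int :=
  if h : res ≠ [] ∧ 0 < k ∧ res.getLastD 'a' < c then
    pvPopsA res.dropLast (k - 1) c
  else (res, k)
termination_by res.length
decreasing_by
  cases res with
  | nil => exact absurd rfl h.1
  | cons a t => simp

-- the final `while k > 0: res = res[:-1]` loop
def pvTrimA (res : List Char) (k : Int) : List Char :=
  if 0 < k then pvTrimA res.dropLast (k - 1) else res
termination_by k.toNat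
decreasing_by omega

def maxSubseq (s : String) (k : Int) : String :=
  -- n = len(s); rem = n - k is computed but never used in A
  let st := s.toList.foldl
    (fun (st : List Char × Int) c =>
      let p := pvPopsA st.1 st.2 c
      (p.1 ++ [c], p.2)) ([], k)
  String.ofList (pvTrimA st.1 st.2)

-- ===== PORT B =====
-- inner loop `for j in range(start+1, end+1): if s[j] > s[best]: best = j`
def pvScanB (l : List Char) (start e : Int) : Int :=
  (PySem.List.pyRange (start + 1) (e + 1) 1).foldl
    (fun best j =>
      if PySem.List.pyGetD l best ' ' < PySem.List.pyGetD l j ' ' then j else best)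
    start

def maxSubseq_alt (s : String) (k : Int) : String :=
  let l := s.toList
  let n : Int := l.length
  if k ≤ 0 then s
  else if n ≤ k then ""
  else
    let L := n - k
    let st := (PySem.List.pyRange 0 L 1).foldl
      (fun (st : List Char × Int) i =>
        let e := n - (L - i)
        let best := pvScanB l st.2 e
        (st.1 ++ [PySem.List.pyGetD l best ' '], best + 1))
      ([], 0)
    String.ofList st.1

-- ===== PRECONDITION & SPEC =====
def Spec_maxSubseq (s : String) (k : Int) (out : String) : Prop := out = maxSubseq_alt s k
instance (s : String) (k : Int) (out : String) : Decidable (Spec_maxSubseq s k out) := by unfold Spec_maxSubseq; infer_instance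

-- ===== CLAIM (what is proved, stated in full; the proofs are below) =====
def Claim_equal_maxSubseq : Prop := ∀ (s : String) (k : Int), Dom_maxSubseq s k → Spec_maxSubseq s k (maxSubseq s k)

-- ===== LEMMAS AND PROOFS =====

-- ---- the common specification: repeated leftmost-max selection ----

-- index of the leftmost maximal character of w (0 on [])
def bestIdx (w : List Char) : Nat :=
  (List.range w.length).foldl
    (fun b i => if w.getD b 'a' < w.getD i 'a' then i else b) 0

lemma bestFold_spec (w : List Char) (m : Nat) (hm : 0 < m) :
    let r := (List.range m).foldl (fun b i => if w.getD b 'a' < w.getD i 'a' then i else b) 0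
    r < m ∧ (∀ i, i < m → w.getD i 'a' ≤ w.getD r 'a') ∧
      (∀ i, i < r → w.getD i 'a' < w.getD r 'a') := by
  induction m with
  | zero => omega
  | succ m ih =>
    rcases Nat.eq_zero_or_pos m with hm0 | hm0
    · subst hm0
      simp only [List.range_succ, List.range_zero, List.nil_append, List.foldl_cons,
        List.foldl_nil, lt_irrefl, ite_self]
      refine ⟨by omega, ?_, by omega⟩
      intro i hi
      interval_cases i
      exact le_refl _
    · have ih' := ih hm0
      simp only at ih' ⊢
      rw [List.range_succ, List.foldl_append, List.foldl_cons, List.foldl_nil]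
      set r := (List.range m).foldl (fun b i => if w.getD b 'a' < w.getD i 'a' then i else b) 0 with hr
      obtain ⟨h1, h2, h3⟩ := ih'
      by_cases hc : w.getD r 'a' < w.getD m 'a'
      · rw [if_pos hc]
        refine ⟨by omega, ?_, ?_⟩
        · intro i hi
          rcases Nat.lt_succ_iff_lt_or_eq.mp hi with h | h
          · exact le_of_lt (lt_of_le_of_lt (h2 i h) hc)
          · subst h; exact le_refl _
        · intro i hi
          rcases Nat.lt_or_ge i r with h | h
          · exact lt_trans (h3 i h) hc
          · rcases Nat.eq_or_lt_of_le h with h' | h'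
            · subst h'; exact hc
            · exact lt_of_le_of_lt (h2 i (by omega)) hc
      · rw [if_neg hc]
        refine ⟨by omega, ?_, h3⟩
        intro i hi
        rcases Nat.lt_succ_iff_lt_or_eq.mp hi with h | h
        · exact h2 i h
        · subst h; exact le_of_not_gt hc

lemma bestIdx_spec (w : List Char) (hw : w ≠ []) :
    bestIdx w < w.length ∧
    (∀ i, i < w.length → w.getD i 'a' ≤ w.getD (bestIdx w) 'a') ∧
    (∀ i, i < bestIdx w → w.getD i 'a' < w.getD (bestIdx w) 'a') := by
  have := bestFold_spec w w.length (by cases w <;> simp_all)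
  exact this

-- the selection spec, on lists, with a Nat budget
def sel (l : List Char) (k : Nat) : List Char :=
  if _h : k = 0 then l
  else if _h2 : l.length ≤ k then []
  else
    let j := bestIdx (l.take (k + 1))
    l.getD j 'a' :: sel (l.drop (j + 1)) (k - j)
termination_by l.length
decreasing_by
  have : l.length ≠ 0 := by omega
  simp [List.length_drop]; omega

-- ---- A-side: reversed-stack model ----

def rpops (r : List Char) (k : Int) (c : Char) : List Char × Int :=
  match r with
  | [] => ([], k)
  | t :: rest => if 0 < k ∧ t < c then rpops rest (k - 1) c else (t :: rest, k)

def rstep (st : List Char × Int) (c : Char) : List Char × Int :=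
  let p := rpops st.1 st.2 c
  (c :: p.1, p.2)

def resultA (l : List Char) (k : Int) : List Char :=
  let st := l.foldl rstep ([], k)
  (st.1.drop st.2.toNat).reverse

lemma rpops_inv (r : List Char) (k : Int) (c : Char) :
    ((rpops r k c).2 : Int) - (rpops r k c).1.length = k - r.length := by
  induction r generalizing k with
  | nil => simp [rpops]
  | cons t rest ih =>
    simp only [rpops]
    split_ifs with h
    · have := ih (k - 1)
      simp only [List.length_cons]
      push_cast at this ⊢
      omega
    · simp

lemma rpops_nonpos (r : List Char) (k : Int) (c : Char) (hk : k ≤ 0) :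
    rpops r k c = (r, k) := by
  cases r with
  | nil => rfl
  | cons t rest => simp only [rpops]; rw [if_neg (by omega)]

lemma rpops_full (r : List Char) (k : Int) (c : Char)
    (hall : ∀ x ∈ r, x < c) (hk : (r.length : Int) ≤ k) :
    rpops r k c = ([], k - r.length) := by
  induction r generalizing k with
  | nil => simp [rpops]
  | cons t rest ih =>
    simp only [List.length_cons] at hk
    simp only [rpops]
    rw [if_pos ⟨by push_cast at hk ⊢; omega, hall t (by simp)⟩]
    rw [ih (k - 1) (fun x hx => hall x (List.mem_cons_of_mem t hx)) (by push_cast at hk ⊢; omega)]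
    simp only [List.length_cons]
    congr 1
    push_cast
    ring

lemma rpops_append_ne (r : List Char) (k : Int) (c b : Char)
    (h : (rpops r k c).1 ≠ []) :
    rpops (r ++ [b]) k c = ((rpops r k c).1 ++ [b], (rpops r k c).2) := by
  induction r generalizing k with
  | nil => simp [rpops] at h
  | cons t rest ih =>
    simp only [rpops, List.cons_append] at h ⊢
    by_cases hc : 0 < k ∧ t < c
    · simp only [if_pos hc] at h ⊢
      exact ih (k - 1) h
    · simp only [if_neg hc] at h ⊢
      simp

lemma rpops_append_nil (r : List Char) (k : Int) (c b : Char)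
    (h : (rpops r k c).1 = []) (h2 : ¬ (0 < (rpops r k c).2 ∧ b < c)) :
    rpops (r ++ [b]) k c = ([b], (rpops r k c).2) := by
  induction r generalizing k with
  | nil =>
    simp only [rpops] at h2 ⊢
    simp only [List.nil_append, rpops]
    rw [if_neg h2]
  | cons t rest ih =>
    simp only [rpops, List.cons_append] at h h2 ⊢
    by_cases hc : 0 < k ∧ t < c
    · simp only [if_pos hc] at h h2 ⊢
      exact ih (k - 1) h h2
    · rw [if_neg hc] at h
      simp at h

lemma rpops_sublist (r : List Char) (k : Int) (c : Char) :
    ∀ x ∈ (rpops r k c).1, x ∈ r := by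
  induction r generalizing k with
  | nil => simp [rpops]
  | cons t rest ih =>
    simp only [rpops]
    split_ifs with hc
    · intro x hx
      exact List.mem_cons_of_mem t (ih (k - 1) x hx)
    · intro x hx
      exact hx

-- budget identity for a run
lemma run_inv (l : List Char) (r : List Char) (k : Int) :
    ((l.foldl rstep (r, k)).2 : Int) =
      k + (l.foldl rstep (r, k)).1.length - r.length - l.length := by
  induction l generalizing r k with
  | nil => simp
  | cons c cs ih =>
    simp only [List.foldl_cons]
    have hs : rstep (r, k) c = ((c :: (rpops r k c).1), (rpops r k c).2) := rfl
    rw [hs, ih]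
    have := rpops_inv r k c
    simp only [List.length_cons]
    push_cast
    omega

lemma run_mem (l : List Char) (r : List Char) (k : Int) :
    ∀ x ∈ (l.foldl rstep (r, k)).1, x ∈ r ∨ x ∈ l := by
  induction l generalizing r k with
  | nil => simp
  | cons c cs ih =>
    intro x hx
    simp only [List.foldl_cons] at hx
    have hs : rstep (r, k) c = ((c :: (rpops r k c).1), (rpops r k c).2) := rfl
    rw [hs] at hx
    rcases ih _ _ x hx with h | h
    · rcases List.mem_cons.mp h with h' | h'
      · right; simp [h']
      · left; exact rpops_sublist r k c x h'
    · right; simp [h]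

lemma run_nonpos (l : List Char) (r : List Char) (k : Int) (hk : k ≤ 0) :
    l.foldl rstep (r, k) = (l.reverse ++ r, k) := by
  induction l generalizing r with
  | nil => simp
  | cons c cs ih =>
    simp only [List.foldl_cons]
    have hs : rstep (r, k) c = ((c :: (rpops r k c).1), (rpops r k c).2) := rfl
    rw [hs, rpops_nonpos r k c hk]
    rw [ih (c :: r)]
    simp

-- the protected-bottom simulation lemma
lemma run_bottom (cs : List Char) (r : List Char) (k : Int) (b : Char)
    (H : ∀ x ∈ cs.take (k - r.length).toNat, x ≤ b) :
    cs.foldl rstep (r ++ [b], k) =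
      ((cs.foldl rstep (r, k)).1 ++ [b], (cs.foldl rstep (r, k)).2) := by
  induction cs generalizing r k with
  | nil => simp
  | cons c cs' ih =>
    simp only [List.foldl_cons]
    have hs : rstep (r, k) c = ((c :: (rpops r k c).1), (rpops r k c).2) := rfl
    have hinv := rpops_inv r k c
    have hstep : rstep (r ++ [b], k) c =
        ((c :: (rpops r k c).1) ++ [b], (rpops r k c).2) := by
      by_cases hne : (rpops r k c).1 = []
      · have h2 : ¬ (0 < (rpops r k c).2 ∧ b < c) := by
          rintro ⟨hpos, hbc⟩
          have hk2 : (rpops r k c).2 = k - r.length := by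
            rw [hne] at hinv; simpa using hinv
          have hkr : 0 < k - (r.length : Int) := by omega
          have hc : c ∈ (c :: cs').take (k - r.length).toNat := by
            have : (k - (r.length : Int)).toNat = ((k - (r.length : Int)).toNat - 1) + 1 := by omega
            rw [this, List.take_succ_cons]
            simp
          exact absurd hbc (not_lt.mpr (le_of_lt (lt_of_le_of_lt (le_refl _) (lt_of_le_of_ne (H c hc) (fun h => by simp [h] at hbc)))))
        show (_, _) = _
        rw [rpops_append_nil r k c b hne h2, hne]
        simp
      · show (_, _) = _
        rw [rpops_append_ne r k c b hne]
        simp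
    rw [hstep, hs]
    have harr : ((rpops r k c).2 : Int) - ((c :: (rpops r k c).1).length) = k - r.length - 1 := by
      simp only [List.length_cons]; push_cast; omega
    apply ih
    intro x hx
    apply H
    have hm : (k - (r.length : Int)).toNat = ((rpops r k c).2 - ((c :: (rpops r k c).1).length : Int)).toNat + 1 ∨ ((rpops r k c).2 - ((c :: (rpops r k c).1).length : Int)).toNat = 0 ∧ (k - (r.length : Int)).toNat = 0 := by
      omega
    rcases hm with hm | ⟨hm, _⟩
    · rw [hm, List.take_succ_cons]
      exact List.mem_cons_of_mem c hx
    · rw [hm] at hx; simp at hx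

-- head lemma: one selection step of the stack algorithm
lemma resultA_step (l : List Char) (k : Nat) (_hk : 0 < k) (hn : k < l.length) :
    resultA l k = l.getD (bestIdx (l.take (k + 1))) 'a' ::
      resultA (l.drop (bestIdx (l.take (k + 1)) + 1)) (k - bestIdx (l.take (k + 1))) := by
  set w := l.take (k + 1) with hwdef
  have hwlen : w.length = k + 1 := by rw [hwdef, List.length_take]; omega
  have hwne : w ≠ [] := by intro h; rw [h] at hwlen; simp at hwlen
  obtain ⟨hjlt, hmax, hlt⟩ := bestIdx_spec w hwne
  set j := bestIdx w with hjdef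
  have hjk : j ≤ k := by omega
  have hjl : j < l.length := by omega
  set c := l.getD j 'a' with hcdef
  have hwgetD : ∀ i, i < k + 1 → i < l.length → w.getD i 'a' = l.getD i 'a' := by
    intro i h1 h2
    rw [List.getD_eq_getElem _ _ (by omega), List.getD_eq_getElem _ _ h2]
    exact List.getElem_take
  have hwj : w.getD j 'a' = c := hwgetD j (by omega) hjl
  have hsplit1 : l.take (j + 1) = l.take j ++ [c] := by
    rw [hcdef, List.getD_eq_getElem _ _ hjl, List.take_add_one,
      List.getElem?_eq_getElem hjl]
    rfl
  set S := (l.take j).foldl rstep ([], (k : Int)) with hS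
  have hSmem : ∀ x ∈ S.1, x < c := by
    intro x hx
    rcases run_mem _ _ _ x hx with h | h
    · simp at h
    · rw [List.mem_take_iff_getElem] at h
      obtain ⟨i, hi, hxe⟩ := h
      have hij : i < j := by omega
      have hwi := hlt i hij
      rw [hwj] at hwi
      rw [hwgetD i (by omega) (by omega), List.getD_eq_getElem _ _ (by omega : i < l.length)] at hwi
      rw [← hxe]
      exact hwi
  have hSlen : (l.take j).length = j := by rw [List.length_take]; omega
  have hSinv := run_inv (l.take j) [] (k : Int)
  rw [hSlen, ← hS] at hSinv
  simp only [List.length_nil, Nat.cast_zero, Int.sub_zero] at hSinv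
  have hpop : rpops S.1 S.2 c = ([], (k : Int) - j) := by
    rw [rpops_full S.1 S.2 c hSmem (by omega)]
    congr 1
    omega
  have hphase1 : (l.take (j + 1)).foldl rstep ([], (k : Int)) = ([c], (k : Int) - j) := by
    rw [hsplit1, List.foldl_append, ← hS, List.foldl_cons, List.foldl_nil]
    show (c :: (rpops S.1 S.2 c).1, (rpops S.1 S.2 c).2) = _
    rw [hpop]
  set cs := l.drop (j + 1) with hcs
  have hcslen : cs.length = l.length - (j + 1) := by simp [hcs]
  have hH : ∀ x ∈ cs.take (((k : Int) - j - (([] : List Char).length : Int)).toNat), x ≤ c := by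
    intro x hx
    simp only [List.length_nil, Nat.cast_zero, Int.sub_zero] at hx
    rw [List.mem_take_iff_getElem] at hx
    obtain ⟨i, hi, hxe⟩ := hx
    have hik : i < k - j := by omega
    have hil : j + 1 + i < l.length := by omega
    have hcsi : cs[i]'(by omega) = l[j + 1 + i]'hil := by
      simp [hcs]
    have hwi := hmax (j + 1 + i) (by omega)
    rw [hwj] at hwi
    rw [hwgetD (j + 1 + i) (by omega) hil, List.getD_eq_getElem _ _ hil] at hwi
    rw [← hxe, hcsi]
    exact hwi
  have hrun : l.foldl rstep ([], (k : Int)) =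
      ((cs.foldl rstep ([], (k : Int) - j)).1 ++ [c], (cs.foldl rstep ([], (k : Int) - j)).2) := by
    conv_lhs => rw [← List.take_append_drop (j + 1) l]
    rw [List.foldl_append, hphase1, ← hcs]
    have := run_bottom cs [] ((k : Int) - j) c hH
    simpa using this
  set F := cs.foldl rstep ([], (k : Int) - j) with hF
  have hFinv := run_inv cs [] ((k : Int) - j)
  rw [← hF] at hFinv
  simp only [List.length_nil, Nat.cast_zero, Int.sub_zero] at hFinv
  have hFb : F.2.toNat ≤ F.1.length := by omega
  show ((l.foldl rstep ([], (k : Int))).1.drop (l.foldl rstep ([], (k : Int))).2.toNat).reverse = _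
  rw [hrun]
  simp only
  rw [List.drop_append_of_le_length hFb, List.reverse_append]
  rfl

lemma resultA_nonpos (l : List Char) (k : Int) (hk : k ≤ 0) : resultA l k = l := by
  have : k.toNat = 0 := by omega
  simp [resultA, run_nonpos l [] k hk, this]

lemma resultA_big (l : List Char) (k : Int) (hk : (l.length : Int) ≤ k) :
    resultA l k = [] := by
  unfold resultA
  have hinv := run_inv l [] k
  simp only [List.length_nil, Nat.cast_zero, Int.sub_zero] at hinv
  have : (l.foldl rstep ([], k)).1.length ≤ (l.foldl rstep ([], k)).2.toNat := by omega
  simp [List.drop_eq_nil_iff.mpr this]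

lemma resultA_eq_sel (l : List Char) (k : Nat) : resultA l k = sel l k := by
  induction hlen : l.length using Nat.strong_induction_on generalizing l k with
  | _ n ih =>
    by_cases hk0 : k = 0
    · subst hk0
      rw [sel]
      simp [resultA_nonpos]
    · by_cases hbig : l.length ≤ k
      · rw [sel, resultA_big l k (by exact_mod_cast Nat.cast_le.mpr hbig)]
        rw [dif_neg hk0, dif_pos hbig]
      · have hstep := resultA_step l k (by omega) (by omega)
        rw [sel, dif_neg hk0, dif_neg hbig]
        simp only at hstep ⊢
        rw [hstep]
        set j := bestIdx (l.take (k + 1)) with hj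
        have hjk : j ≤ k := by
          have := (bestIdx_spec (l.take (k + 1)) (by
            intro h
            have : (l.take (k + 1)).length = 0 := by rw [h]; rfl
            rw [List.length_take] at this
            omega)).1
          rw [List.length_take] at this
          omega
        congr 1
        have hcast : (k : Int) - (j : Int) = ((k - j : Nat) : Int) := by omega
        rw [hcast]
        exact ih (l.drop (j + 1)).length (by simp [List.length_drop]; omega)
          (l.drop (j + 1)) (k - j) rfl

-- bridge: the literal port A equals the reversed-stack model
lemma pvPopsA_rev (r : List Char) (k : Int) (c : Char) :
    pvPopsA r.reverse k c = ((rpops r k c).1.reverse, (rpops r k c).2) := by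
  induction r generalizing k with
  | nil => rw [pvPopsA]; simp [rpops]
  | cons t rest ih =>
    rw [pvPopsA]
    simp only [List.reverse_cons]
    by_cases hc : 0 < k ∧ t < c
    · rw [dif_pos (by
        refine ⟨by simp, hc.1, ?_⟩
        rw [List.getLastD_concat]
        exact hc.2)]
      rw [List.dropLast_concat]
      rw [ih (k - 1)]
      simp only [rpops, if_pos hc]
    · rw [dif_neg (by
        rintro ⟨h1, h2, h3⟩
        rw [List.getLastD_concat] at h3
        exact hc ⟨h2, h3⟩)]
      simp only [rpops, if_neg hc, List.reverse_cons]

lemma pvTrimA_rev (r : List Char) (k : Int) :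
    pvTrimA r.reverse k = (r.drop k.toNat).reverse := by
  induction hn : k.toNat using Nat.strong_induction_on generalizing k r with
  | _ n ih =>
    by_cases hk : 0 < k
    · rw [pvTrimA, if_pos hk]
      have hd : r.reverse.dropLast = r.tail.reverse := by
        cases r with
        | nil => rfl
        | cons a t => simp
      rw [hd, ih (k - 1).toNat (by omega) r.tail (k - 1) rfl]
      congr 1
      cases r with
      | nil => simp
      | cons a t =>
        rw [show n = (k - 1).toNat + 1 by omega]
        simp
    · rw [pvTrimA, if_neg hk]
      rw [show n = 0 by omega]
      simp

lemma foldl_step_rev (l : List Char) (r : List Char) (k : Int) :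
    l.foldl (fun (st : List Char × Int) c =>
        let p := pvPopsA st.1 st.2 c
        (p.1 ++ [c], p.2)) (r.reverse, k)
      = ((l.foldl rstep (r, k)).1.reverse, (l.foldl rstep (r, k)).2) := by
  induction l generalizing r k with
  | nil => simp
  | cons c cs ih =>
    simp only [List.foldl_cons]
    have h1 : (let p := pvPopsA r.reverse k c; (p.1 ++ [c], p.2))
        = ((c :: (rpops r k c).1).reverse, (rpops r k c).2) := by
      simp only [pvPopsA_rev, List.reverse_cons]
    rw [h1, ih]
    rfl

lemma maxSubseq_eq_resultA (s : String) (k : Int) :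
    maxSubseq s k = String.ofList (resultA s.toList k) := by
  unfold maxSubseq
  simp only
  have h := foldl_step_rev s.toList [] k
  simp only [List.reverse_nil] at h
  rw [h]
  show String.ofList (pvTrimA (List.foldl rstep ([], k) s.toList).1.reverse
    (List.foldl rstep ([], k) s.toList).2) = _
  rw [pvTrimA_rev]
  rfl

-- ---- B-side ----

lemma scan_eq_bestIdx (l : List Char) (st m : Nat) (hm : 0 < m)
    (hlen : st + m ≤ l.length) :
    pvScanB l st (st + m - 1) = st + bestIdx ((l.drop st).take m) := by
  set w := (l.drop st).take m with hwdef
  have hwlen : w.length = m := by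
    rw [hwdef, List.length_take, List.length_drop]
    omega
  have hwl : ∀ (i : Nat), i < m → ∀ d, w.getD i d = l.getD (st + i) d := by
    intro i hi d
    rw [List.getD_eq_getElem _ _ (by omega), List.getD_eq_getElem _ _ (by omega)]
    simp [hwdef, List.getElem_take, List.getElem_drop]
  have trans : ∀ (js : List Nat) (b : Nat), (∀ i ∈ js, i + 1 < m) → b < m →
      js.foldl (fun (best : Int) (i : Nat) =>
          if PySem.List.pyGetD l best ' ' < PySem.List.pyGetD l ((st : Int) + 1 + (i : Int)) ' '
          then (st : Int) + 1 + (i : Int) else best) ((st : Int) + (b : Int))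
        = (st : Int) + ((js.foldl (fun (b : Nat) (i : Nat) =>
            if w.getD b 'a' < w.getD (i + 1) 'a' then i + 1 else b) b : Nat) : Int) := by
    intro js
    induction js with
    | nil => intro b _ _; simp
    | cons i js ih =>
      intro b hjs hb
      have hi1 : i + 1 < m := hjs i (by simp)
      simp only [List.foldl_cons]
      have hg1 : PySem.List.pyGetD l ((st : Int) + (b : Int)) ' ' = w.getD b 'a' := by
        rw [show (st : Int) + (b : Int) = ((st + b : Nat) : Int) by push_cast; ring]
        rw [PySem.List.pyGetD_natCast]
        rw [List.getD_eq_getElem _ _ (by omega), List.getD_eq_getElem _ _ (by omega)]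
        simp [hwdef, List.getElem_take, List.getElem_drop]
      have hg2 : PySem.List.pyGetD l ((st : Int) + 1 + (i : Int)) ' ' = w.getD (i + 1) 'a' := by
        rw [show (st : Int) + 1 + (i : Int) = ((st + (i + 1) : Nat) : Int) by push_cast; ring]
        rw [PySem.List.pyGetD_natCast]
        rw [List.getD_eq_getElem _ _ (by omega), List.getD_eq_getElem _ _ (by omega)]
        simp [hwdef, List.getElem_take, List.getElem_drop]
      rw [hg1, hg2]
      by_cases hc : w.getD b 'a' < w.getD (i + 1) 'a'
      · rw [if_pos hc, if_pos hc]
        rw [show (st : Int) + 1 + (i : Int) = (st : Int) + ((i + 1 : Nat) : Int) by push_cast; ring]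
        exact ih (i + 1) (fun x hx => hjs x (by simp [hx])) hi1
      · rw [if_neg hc, if_neg hc]
        exact ih b (fun x hx => hjs x (by simp [hx])) hb
  unfold pvScanB
  rw [show ((st : Int) + (m : Int) - 1 + 1) = (st : Int) + (m : Int) by ring]
  rw [PySem.List.pyRange_one]
  rw [show (((st : Int) + (m : Int)) - ((st : Int) + 1)).toNat = m - 1 by omega]
  rw [List.foldl_map]
  have hb0 : bestIdx w = (List.range (m - 1)).foldl (fun (b : Nat) (i : Nat) =>
      if w.getD b 'a' < w.getD (i + 1) 'a' then i + 1 else b) 0 := by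
    unfold bestIdx
    rw [hwlen, show m = (m - 1) + 1 by omega, List.range_succ_eq_map, List.foldl_cons,
      List.foldl_map]
    rw [if_neg (lt_irrefl _)]
    simp only [Nat.succ_eq_add_one, Nat.add_sub_cancel]
  rw [hb0]
  have := trans (List.range (m - 1)) 0 (fun i hi => by
    rw [List.mem_range] at hi; omega) hm
  simp only [Nat.cast_zero, add_zero] at this
  exact this

lemma sel_len (x : List Char) (k : Nat) (hk : x.length ≤ k) : sel x k = [] := by
  rw [sel]
  split_ifs with h1
  · exact List.length_eq_zero_iff.mp (by omega)
  · rfl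

lemma alt_loop (l : List Char) (L : Int) (d : Nat) :
    ∀ (i : Int) (st : Nat) (acc : List Char), (L - i).toNat = d → 0 ≤ i → i ≤ L →
    (st : Int) + (L - i) ≤ (l.length : Int) →
    ((PySem.List.pyRange i L 1).foldl
      (fun (p : List Char × Int) i =>
        let e := ((l.length : Int)) - (L - i)
        let best := pvScanB l p.2 e
        (p.1 ++ [PySem.List.pyGetD l best ' '], best + 1))
      (acc, (st : Int))).1
    = acc ++ sel (l.drop st) ((l.length - st) - (L - i).toNat) := by
  induction d generalizing l L with
  | zero =>
    intro i st acc hd h0 hiL hst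
    have hieq : i = L := by omega
    subst hieq
    rw [PySem.List.pyRange_one_eq_nil (le_refl i), List.foldl_nil]
    have hsel : sel (l.drop st) (l.length - st) = [] := by
      apply sel_len
      simp [List.length_drop]
    simp only [Int.sub_self, Int.toNat_zero, Nat.sub_zero]
    rw [hsel, List.append_nil]
  | succ d ih =>
    intro i st acc hd h0 hiL hst
    have hilt : i < L := by omega
    rw [PySem.List.pyRange_one_cons hilt, List.foldl_cons]
    simp only
    have hstn : st + (d + 1) ≤ l.length := by omega
    set kr := (l.length - st) - (L - i).toNat with hkr
    have hkrd : kr = l.length - st - (d + 1) := by omega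
    have hmr : (l.length : Int) - (L - i) = (st : Int) + ((kr + 1 : Nat) : Int) - 1 := by
      push_cast
      omega
    rw [hmr, scan_eq_bestIdx l st (kr + 1) (by omega) (by omega)]
    set w := (l.drop st).take (kr + 1) with hw
    have hwlen : w.length = kr + 1 := by
      rw [hw, List.length_take, List.length_drop]
      omega
    have hwne : w ≠ [] := by
      intro h
      rw [h] at hwlen
      simp at hwlen
    set j := bestIdx w with hj
    have hjlt : j < kr + 1 := by
      have := (bestIdx_spec w hwne).1
      omega
    have hstep : (st : Int) + (j : Int) + 1 = ((st + j + 1 : Nat) : Int) := by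
      push_cast
      ring
    rw [hstep]
    rw [ih l L (i + 1) (st + j + 1) _ (by omega) (by omega) (by omega) (by push_cast; omega)]
    rw [List.append_assoc]
    congr 1
    have hdrop2 : l.drop (st + j + 1) = (l.drop st).drop (j + 1) := by
      rw [List.drop_drop]
      congr 1
    have hchar : PySem.List.pyGetD l ((st : Int) + (j : Int)) ' ' = (l.drop st).getD j 'a' := by
      rw [show (st : Int) + (j : Int) = ((st + j : Nat) : Int) by push_cast; ring,
        PySem.List.pyGetD_natCast]
      rw [List.getD_eq_getElem _ _ (by omega), List.getD_eq_getElem _ _ (by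
        rw [List.length_drop]; omega)]
      simp [List.getElem_drop]
    rw [hchar, hdrop2]
    have hlen2 : l.length - (st + j + 1) - (L - (i + 1)).toNat = kr - j := by omega
    rw [hlen2]
    by_cases hkr0 : kr = 0
    · have hj0 : j = 0 := by omega
      have hsel0 : ∀ (y : List Char), sel y 0 = y := by
        intro y
        rw [sel]
        simp
      rw [hj0, hkr0]
      norm_num
      rw [hsel0, hsel0]
      cases hx : l.drop st with
      | nil =>
        exfalso
        have := congrArg List.length hx
        rw [List.length_drop] at this
        simp at this
        omega
      | cons a t =>
        have h1 : l[st]? = some a := by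
          have h := congrArg (fun (y : List Char) => y[0]?) hx
          simpa [List.getElem?_drop] using h
        have h2 : List.drop (st + 1) l = t := by
          have h3 : List.drop 1 (List.drop st l) = t := by rw [hx]; rfl
          rw [List.drop_drop] at h3
          exact h3
        simp [h1, h2]
    · conv_rhs => rw [sel]
      rw [dif_neg hkr0, dif_neg (by rw [List.length_drop]; omega)]
      rfl

lemma maxSubseq_alt_eq_sel (s : String) (k : Int) (h0 : 0 < k) (hn : k < (s.toList.length : Int)) :
    maxSubseq_alt s k = String.ofList (sel s.toList k.toNat) := by
  unfold maxSubseq_alt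
  simp only
  rw [if_neg (by omega), if_neg (by omega)]
  set l := s.toList with hl
  have hn' : k < (l.length : Int) := hn
  set L := (l.length : Int) - k with hL
  have h := alt_loop l L (L - 0).toNat 0 0 [] rfl (le_refl 0) (by omega) (by push_cast; omega)
  simp only [Nat.cast_zero] at h
  rw [h]
  rw [List.drop_zero, List.nil_append]
  have harg : l.length - 0 - (L - 0).toNat = k.toNat := by omega
  rw [harg]

-- ===== VERDICT (by name: the statement is the Claim_ definition above) =====
theorem maxSubseq_spec : Claim_equal_maxSubseq := by
  intro s k _
  unfold Spec_maxSubseq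
  by_cases hk0 : k ≤ 0
  · rw [maxSubseq_eq_resultA, resultA_nonpos _ _ hk0]
    unfold maxSubseq_alt
    simp only
    rw [if_pos hk0]
    simp
  · by_cases hbig : (s.toList.length : Int) ≤ k
    · rw [maxSubseq_eq_resultA, resultA_big _ _ hbig]
      unfold maxSubseq_alt
      simp only
      rw [if_neg hk0, if_pos hbig]
    · have hA : maxSubseq s k = String.ofList (sel s.toList k.toNat) := by
        rw [maxSubseq_eq_resultA]
        congr 1
        have hr := resultA_eq_sel s.toList k.toNat
        rw [show ((k.toNat : Nat) : Int) = k from by omega] at hr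
        exact hr
      rw [hA, maxSubseq_alt_eq_sel s k (by omega) (by omega)]
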